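-- pv_equiv track=rewrite | github.com/D-P1R5N/AdventOfCode2022 | day2.py | transmog
-- ===== SOURCE A (Python) =====
-- SYMBOLS = {
--     "ROCK":['A','X'],
--     "PAPER":['B', 'Y'],
--     "SCISSORS":['C', 'Z']
--     }
--
-- def transmog(match):
--     opp, you = match
--     for _ in match:
--         for k in SYMBOLS:
--             if opp in SYMBOLS[k]:
--                 opp = k
--             if you in SYMBOLS[k]:
--                 you = k
--     return (opp, you)
-- ===== SOURCE B (Python) =====
-- SYMBOLS = {
--     "ROCK":['A','X'],
--     "PAPER":['B', 'Y'],
--     "SCISSORS":['C', 'Z']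
--     }
--
-- CHAR = {c: name for name, chars in SYMBOLS.items() for c in chars}
--
-- def transmog(match):
--     opp, you = match
--     return (CHAR.get(opp, opp), CHAR.get(you, you))
-- ===== Notes on version B (the rewrite author's own statement) =====
-- stated objective: simpler
-- what changed: Replaces the redundant double pass with nested key scans by a single precomputed inverted lookup table (symbol char -> category name) consulted once per side with identity fallback.
import Mathlib
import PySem

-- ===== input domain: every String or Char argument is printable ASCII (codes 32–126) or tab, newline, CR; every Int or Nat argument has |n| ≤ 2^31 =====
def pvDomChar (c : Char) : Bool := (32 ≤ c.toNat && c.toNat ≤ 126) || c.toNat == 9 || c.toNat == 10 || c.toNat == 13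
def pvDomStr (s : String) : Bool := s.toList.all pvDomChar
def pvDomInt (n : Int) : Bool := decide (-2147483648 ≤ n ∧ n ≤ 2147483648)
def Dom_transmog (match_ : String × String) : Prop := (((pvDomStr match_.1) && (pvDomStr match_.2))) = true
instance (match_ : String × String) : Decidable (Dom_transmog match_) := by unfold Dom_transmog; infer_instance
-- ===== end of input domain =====

-- B replaces A's redundant double pass with nested key scans by one precomputed
-- inverted lookup table consulted once per side; simpler, same result.

-- ===== PORT A =====
-- SYMBOLS as an insertion-ordered dict (association list)
def pvSymbols : List (String × List String) :=
  [("ROCK", ["A", "X"]), ("PAPER", ["B", "Y"]), ("SCISSORS", ["C", "Z"])]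

-- `for _ in match` iterates over the 2 components of the tuple (values unused);
-- inner loop scans the dict keys in order, updating opp/you sequentially.
def transmog (match_ : String × String) : String × String :=
  ([match_.1, match_.2]).foldl
    (fun st _ =>
      pvSymbols.foldl
        (fun (st : String × String) kv =>
          let opp := if st.1 ∈ kv.2 then kv.1 else st.1
          let you := if st.2 ∈ kv.2 then kv.1 else st.2
          (opp, you)) st)
    (match_.1, match_.2)

-- ===== PORT B =====
-- inverted table built once: symbol char -> category name
def pvChar : PySem.Dict String String :=
  PySem.Dict.mk [("A", "ROCK"), ("X", "ROCK"), ("B", "PAPER"), ("Y", "PAPER"),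
   ("C", "SCISSORS"), ("Z", "SCISSORS")]

def transmog_alt (match_ : String × String) : String × String :=
  (PySem.Dict.getD pvChar match_.1 match_.1, PySem.Dict.getD pvChar match_.2 match_.2)

-- ===== PRECONDITION & SPEC =====
def Spec_transmog (match_ : String × String) (out : String × String) : Prop := out = transmog_alt match_
instance (match_ : String × String) (out : String × String) : Decidable (Spec_transmog match_ out) := by unfold Spec_transmog; infer_instance

-- ===== CLAIM (what is proved, stated in full; the proofs are below) =====
def Claim_equal_transmog : Prop := ∀ (match_ : String × String), Dom_transmog match_ → Spec_transmog match_ (transmog match_)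

-- ===== LEMMAS AND PROOFS =====

-- one inner pass over pvSymbols acts componentwise on the pair
def pvPass (s : String) : String :=
  pvSymbols.foldl (fun t kv => if t ∈ kv.2 then kv.1 else t) s

theorem pvPass_pair (a b : String) :
    pvSymbols.foldl
      (fun (st : String × String) kv =>
        let opp := if st.1 ∈ kv.2 then kv.1 else st.1
        let you := if st.2 ∈ kv.2 then kv.1 else st.2
        (opp, you)) (a, b) = (pvPass a, pvPass b) := by
  simp [pvSymbols, pvPass, List.foldl]

theorem pvPass_pass (s : String) :
    pvPass (pvPass s) = PySem.Dict.getD pvChar s s := by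
  by_cases hA : s = "A"; · subst hA; decide
  by_cases hX : s = "X"; · subst hX; decide
  by_cases hB : s = "B"; · subst hB; decide
  by_cases hY : s = "Y"; · subst hY; decide
  by_cases hC : s = "C"; · subst hC; decide
  by_cases hZ : s = "Z"; · subst hZ; decide
  have a : ("A" == s) = false := beq_eq_false_iff_ne.mpr (Ne.symm hA)
  have x : ("X" == s) = false := beq_eq_false_iff_ne.mpr (Ne.symm hX)
  have b : ("B" == s) = false := beq_eq_false_iff_ne.mpr (Ne.symm hB)
  have y : ("Y" == s) = false := beq_eq_false_iff_ne.mpr (Ne.symm hY)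
  have c : ("C" == s) = false := beq_eq_false_iff_ne.mpr (Ne.symm hC)
  have z : ("Z" == s) = false := beq_eq_false_iff_ne.mpr (Ne.symm hZ)
  simp [pvPass, pvSymbols, pvChar, List.foldl, PySem.Dict.getD, PySem.Dict.get?,
    hA, hX, hB, hY, hC, hZ, a, x, b, y, c, z]

-- ===== VERDICT (by name: the statement is the Claim_ definition above) =====
theorem transmog_spec : Claim_equal_transmog := by
  intro m _
  show transmog m = transmog_alt m
  show ([m.1, m.2]).foldl _ (m.1, m.2) = _
  simp only [List.foldl, pvPass_pair]
  exact Prod.ext (pvPass_pass m.1) (pvPass_pass m.2)
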